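-- pv_equiv track=rewrite | github.com/howprobable/browser_interface | browser_interface/browser.py | get_text_of_elem
-- ===== SOURCE A (Python) =====
-- def get_text_of_elem(json_data):
--     text = json_data.get("text", "").strip()
--     title = json_data.get("title", "").strip()
--     ariaLabel = json_data.get("ariaLabel", "").strip()
--
--     elements = [title, ariaLabel]
--     non_empty_elements = [e for e in elements if e]
--
--     if text:
--         if non_empty_elements:
--             return f"{text}({', '.join(non_empty_elements)})"
--         return text
--     elif non_empty_elements:
--         if len(non_empty_elements) == 2:
--             return f"{non_empty_elements[0]}({non_empty_elements[1]})"
--         return non_empty_elements[0]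
--     return ""  # or "" if you prefer to return an empty string
-- ===== SOURCE B (Python) =====
-- def get_text_of_elem(json_data):
--     # Single pass with an accumulator: first non-empty stripped field becomes the
--     # head, subsequent ones are appended into an extras string; no intermediate
--     # list / join is built.
--     head = None
--     extras = ""
--     for key in ("text", "title", "ariaLabel"):
--         val = json_data.get(key, "").strip()
--         if not val:
--             continue
--         if head is None:
--             head = val
--         elif extras:
--             extras += ", " + val
--         else:
--             extras = val
--     if head is None:
--         return ""
--     return head + "(" + extras + ")" if extras else head
-- ===== Notes on version B (the rewrite author's own statement) =====
-- stated objective: alternative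
-- what changed: Replaces A's staged passes (build list of non-empty fields, branch on text and len==2, join) by a single fold over the three keys with a head/extras accumulator; the formatted result is assembled incrementally and no intermediate list or join is used.
import Mathlib
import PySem

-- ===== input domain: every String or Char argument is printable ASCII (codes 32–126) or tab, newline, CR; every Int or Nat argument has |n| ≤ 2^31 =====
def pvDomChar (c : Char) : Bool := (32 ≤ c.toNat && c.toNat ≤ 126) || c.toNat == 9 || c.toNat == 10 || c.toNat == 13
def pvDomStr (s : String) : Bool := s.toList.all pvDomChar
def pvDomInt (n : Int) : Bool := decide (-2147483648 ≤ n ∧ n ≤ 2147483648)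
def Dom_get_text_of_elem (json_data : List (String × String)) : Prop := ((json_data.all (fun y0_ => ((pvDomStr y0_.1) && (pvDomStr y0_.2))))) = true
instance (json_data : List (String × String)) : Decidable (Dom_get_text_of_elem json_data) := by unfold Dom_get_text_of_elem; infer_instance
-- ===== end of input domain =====

-- ===== PORT A =====
-- B replaces A's staged list-filter/join with a single fold carrying a head/extras accumulator (alternative; same cost).
def get_text_of_elem (json_data : List (String × String)) : String :=
  let text := PySem.Str.strip (PySem.Dict.getD (PySem.Dict.mk json_data) "text" "")
  let title := PySem.Str.strip (PySem.Dict.getD (PySem.Dict.mk json_data) "title" "")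
  let ariaLabel := PySem.Str.strip (PySem.Dict.getD (PySem.Dict.mk json_data) "ariaLabel" "")
  let elements := [title, ariaLabel]
  let non_empty_elements := elements.filter (fun e => e ≠ "")
  if text ≠ "" then
    if non_empty_elements ≠ [] then
      PySem.Str.join "" [text, "(", PySem.Str.join ", " non_empty_elements, ")"]
    else text
  else if non_empty_elements ≠ [] then
    if non_empty_elements.length = 2 then
      PySem.Str.join "" [non_empty_elements.getD 0 "", "(", non_empty_elements.getD 1 "", ")"]
    else non_empty_elements.getD 0 ""
  else ""

-- ===== PORT B =====
def get_text_of_elem_alt (json_data : List (String × String)) : String :=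
  let step := fun (st : Option String × String) (key : String) =>
    let val := PySem.Str.strip (PySem.Dict.getD (PySem.Dict.mk json_data) key "")
    if val = "" then st
    else
      match st with
      | (none, ex) => (some val, ex)
      | (some h, ex) => if ex ≠ "" then (some h, ex ++ ", " ++ val) else (some h, val)
  match ["text", "title", "ariaLabel"].foldl step (none, "") with
  | (none, _) => ""
  | (some h, ex) => if ex ≠ "" then h ++ "(" ++ ex ++ ")" else h

-- ===== PRECONDITION & SPEC =====
def Spec_get_text_of_elem (json_data : List (String × String)) (out : String) : Prop := out = get_text_of_elem_alt json_data
instance (json_data : List (String × String)) (out : String) : Decidable (Spec_get_text_of_elem json_data out) := by unfold Spec_get_text_of_elem; infer_instance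

-- ===== CLAIM (what is proved, stated in full; the proofs are below) =====
def Claim_equal_get_text_of_elem : Prop := ∀ (json_data : List (String × String)), Dom_get_text_of_elem json_data → Spec_get_text_of_elem json_data (get_text_of_elem json_data)

-- ===== LEMMAS AND PROOFS =====

-- ===== VERDICT (by name: the statement is the Claim_ definition above) =====
theorem get_text_of_elem_spec : Claim_equal_get_text_of_elem := by
  intro json_data _
  unfold Spec_get_text_of_elem get_text_of_elem get_text_of_elem_alt
  by_cases ht : PySem.Str.strip (PySem.Dict.getD (PySem.Dict.mk json_data) "text" "") = "" <;>
  by_cases hi : PySem.Str.strip (PySem.Dict.getD (PySem.Dict.mk json_data) "title" "") = "" <;>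
  by_cases ha : PySem.Str.strip (PySem.Dict.getD (PySem.Dict.mk json_data) "ariaLabel" "") = "" <;>
    simp [ht, hi, ha, List.filter, List.foldl, PySem.Str.join] <;>
    · apply String.toList_injective
      simp [PySem.Chars.join, List.intercalate]
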